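-- pv_equiv track=rewrite | github.com/pravals17/Bhugol | Code/BhugolSpatioContextualFrequentSuffixesUSA.py | concat_placenames
-- ===== SOURCE A (Python) =====
-- def concat_placenames(original_tags):
--     """
--     Combine names of the locations if the locations consists of two words eg. New Delhi
--     """
--     locations = []
--     l = len(original_tags)
--     i=0;
--     # Iterate over the tagged words.
--     while i<l:
--         e,t = original_tags[i]
--         # If it's a location, then check the next words.
--         if t == 'LOCATION':
--             j = 1
--             s = e
--             # Verify the tags for the next words.
--             while i+j<len(original_tags):
--                 # If the next words are also locations, then concatenate them to make a longer string. This is useful for place names with multiple words. e.g., New York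
--                 if original_tags[i+j][1] == 'LOCATION':
--                     s = s+" "+original_tags[i+j][0]
--                     j+=1
--                 else:
--                     break
--             i = i+j
--             # Save the locations to a locations list
--             locations+=[s]
--         else:
--             i=i+1
--
--     return locations
-- ===== SOURCE B (Python) =====
-- def concat_placenames(original_tags):
--     """One pass: maintain the phrase being built for the current LOCATION run."""
--     locations = []
--     current = None
--     for e, t in original_tags:
--         if t == 'LOCATION':
--             current = e if current is None else current + " " + e
--         else:
--             if current is not None:
--                 locations.append(current)
--                 current = None
--     if current is not None:
--         locations.append(current)
--     return locations
-- ===== Notes on version B (the rewrite author's own statement) =====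
-- stated objective: simpler
-- what changed: Replaced the index-jumping outer while loop with a nested lookahead while loop by a single left-to-right pass that folds each element into an Optional current-run accumulator and flushes it when the run ends.
import Mathlib
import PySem

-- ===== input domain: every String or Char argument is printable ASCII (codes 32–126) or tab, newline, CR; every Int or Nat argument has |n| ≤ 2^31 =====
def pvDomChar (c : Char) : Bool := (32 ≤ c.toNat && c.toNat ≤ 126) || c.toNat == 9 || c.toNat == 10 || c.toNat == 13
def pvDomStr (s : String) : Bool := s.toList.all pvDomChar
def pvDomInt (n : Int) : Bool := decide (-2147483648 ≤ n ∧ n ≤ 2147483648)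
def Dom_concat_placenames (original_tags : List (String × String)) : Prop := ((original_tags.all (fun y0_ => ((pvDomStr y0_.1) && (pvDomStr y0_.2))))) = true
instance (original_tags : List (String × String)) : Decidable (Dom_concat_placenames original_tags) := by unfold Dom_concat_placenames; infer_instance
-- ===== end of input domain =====

-- B replaces A's index-jumping while loops by a single fold carrying the current LOCATION run (simpler; return value only, no mutation involved).

-- ===== PORT A =====
-- inner `while i+j < len(original_tags)` loop; fuel is only a totality device (i+j increases each step)
def pvAInner (tags : List (String × String)) : Nat → Nat → Nat → String → String × Nat
  | 0, _, j, s => (s, j)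
  | fuel+1, i, j, s =>
    if h : i + j < tags.length then
      if (tags[i+j]'h).2 == "LOCATION" then
        pvAInner tags fuel i (j+1) (s ++ " " ++ (tags[i+j]'h).1)
      else (s, j)
    else (s, j)

-- outer `while i < l` loop; fuel is only a totality device (i increases each step)
def pvALoop (tags : List (String × String)) : Nat → Nat → List String → List String
  | 0, _, acc => acc
  | fuel+1, i, acc =>
    if h : i < tags.length then
      let e := (tags[i]'h).1
      let t := (tags[i]'h).2
      if t == "LOCATION" then
        let r := pvAInner tags tags.length i 1 e
        pvALoop tags fuel (i + r.2) (acc ++ [r.1])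
      else
        pvALoop tags fuel (i+1) acc
    else acc

def concat_placenames (original_tags : List (String × String)) : List String :=
  pvALoop original_tags original_tags.length 0 []

-- ===== PORT B =====
def pvBStep (st : List String × Option String) (p : String × String) : List String × Option String :=
  if p.2 == "LOCATION" then
    (st.1, some (match st.2 with | none => p.1 | some s => s ++ " " ++ p.1))
  else
    (match st.2 with | none => st.1 | some s => st.1 ++ [s], none)

def concat_placenames_alt (original_tags : List (String × String)) : List String :=
  let st := original_tags.foldl pvBStep ([], none)
  match st.2 with | none => st.1 | some s => st.1 ++ [s]

-- ===== PRECONDITION & SPEC =====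
def Spec_concat_placenames (original_tags : List (String × String)) (out : List String) : Prop := out = concat_placenames_alt original_tags
instance (original_tags : List (String × String)) (out : List String) : Decidable (Spec_concat_placenames original_tags out) := by unfold Spec_concat_placenames; infer_instance

-- ===== CLAIM (what is proved, stated in full; the proofs are below) =====
def Claim_equal_concat_placenames : Prop := ∀ (original_tags : List (String × String)), Dom_concat_placenames original_tags → Spec_concat_placenames original_tags (concat_placenames original_tags)

-- ===== LEMMAS AND PROOFS =====
def pvIsLoc (x : String × String) : Bool := x.2 == "LOCATION"

mutual
  def pvSpec : List (String × String) → List String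
    | [] => []
    | (e, t) :: rest => if t == "LOCATION" then pvSpec2 e rest else pvSpec rest
  def pvSpec2 : String → List (String × String) → List String
    | s, [] => [s]
    | s, (e, t) :: rest => if t == "LOCATION" then pvSpec2 (s ++ " " ++ e) rest else s :: pvSpec rest
end

theorem pvSpec2_eq (rest : List (String × String)) : ∀ s : String,
    pvSpec2 s rest =
      (List.foldl (fun s e => s ++ " " ++ e.1) s (rest.takeWhile pvIsLoc)) :: pvSpec (rest.dropWhile pvIsLoc) := by
  induction rest with
  | nil => intro s; simp [pvSpec2, pvSpec]
  | cons x xs ih =>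
    intro s
    obtain ⟨e, t⟩ := x
    by_cases h : t == "LOCATION"
    · simp [pvSpec2, h, List.takeWhile, List.dropWhile, pvIsLoc, ih]
    · simp [pvSpec2, pvSpec, h, List.takeWhile, List.dropWhile, pvIsLoc]

theorem pvDropWhile_eq_drop (p : α → Bool) (l : List α) :
    l.dropWhile p = l.drop (l.takeWhile p).length := by
  induction l with
  | nil => simp
  | cons x xs ih =>
    by_cases h : p x
    · simp [List.dropWhile, List.takeWhile, h, ih]
    · simp [List.dropWhile, List.takeWhile, h]

theorem pvAInner_eq (tags : List (String × String)) : ∀ (fuel i j : Nat) (s : String),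
    tags.length ≤ i + j + fuel →
    pvAInner tags fuel i j s =
      (List.foldl (fun s e => s ++ " " ++ e.1) s ((tags.drop (i+j)).takeWhile pvIsLoc),
       j + ((tags.drop (i+j)).takeWhile pvIsLoc).length) := by
  intro fuel
  induction fuel with
  | zero =>
    intro i j s hle
    have : tags.drop (i+j) = [] := List.drop_eq_nil_of_le (by omega)
    simp [pvAInner, this]
  | succ fuel ih =>
    intro i j s hle
    by_cases h : i + j < tags.length
    · have hd : tags.drop (i+j) = (tags[i+j]'h) :: tags.drop (i+j+1) :=
        List.drop_eq_getElem_cons h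
      by_cases ht : (tags[i+j]'h).2 == "LOCATION"
      · have hih := ih i (j+1) (s ++ " " ++ (tags[i+j]'h).1) (by omega)
        have hij : i + (j+1) = i + j + 1 := by omega
        rw [hij] at hih
        have htw : (tags.drop (i+j)).takeWhile pvIsLoc
            = (tags[i+j]'h) :: (tags.drop (i+j+1)).takeWhile pvIsLoc := by
          rw [hd, List.takeWhile_cons_of_pos (by simpa [pvIsLoc] using ht)]
        simp only [pvAInner, dif_pos h, if_pos ht, hih, htw, List.foldl_cons, List.length_cons]
        simp only [Prod.mk.injEq]
        exact ⟨trivial, by omega⟩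
      · have htw : (tags.drop (i+j)).takeWhile pvIsLoc = [] := by
          rw [hd, List.takeWhile_cons_of_neg (by simpa [pvIsLoc] using ht)]
        simp [pvAInner, h, ht, htw]
    · have : tags.drop (i+j) = [] := List.drop_eq_nil_of_le (by omega)
      simp [pvAInner, h, this]

theorem pvALoop_eq (tags : List (String × String)) : ∀ (fuel i : Nat) (acc : List String),
    tags.length ≤ i + fuel →
    pvALoop tags fuel i acc = acc ++ pvSpec (tags.drop i) := by
  intro fuel
  induction fuel with
  | zero =>
    intro i acc hle
    have : tags.drop i = [] := List.drop_eq_nil_of_le (by omega)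
    simp [pvALoop, this, pvSpec]
  | succ fuel ih =>
    intro i acc hle
    by_cases h : i < tags.length
    · have hd : tags.drop i = (tags[i]'h) :: tags.drop (i+1) := List.drop_eq_getElem_cons h
      by_cases ht : (tags[i]'h).2 == "LOCATION"
      · have hinner := pvAInner_eq tags tags.length i 1 (tags[i]'h).1 (by omega)
        have hrec := ih (i + (1 + ((tags.drop (i+1)).takeWhile pvIsLoc).length))
          (acc ++ [List.foldl (fun s e => s ++ " " ++ e.1) (tags[i]'h).1 ((tags.drop (i+1)).takeWhile pvIsLoc)])
          (by omega)
        simp only [pvALoop, dif_pos h, if_pos ht, hinner, hrec]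
        have hdropdrop : tags.drop (i + (1 + ((tags.drop (i+1)).takeWhile pvIsLoc).length))
            = (tags.drop (i+1)).dropWhile pvIsLoc := by
          rw [pvDropWhile_eq_drop]
          rw [show i + (1 + ((tags.drop (i+1)).takeWhile pvIsLoc).length)
              = (i+1) + ((tags.drop (i+1)).takeWhile pvIsLoc).length by omega]
          rw [← List.drop_drop]
        rw [hdropdrop, hd]
        rcases hx : tags[i]'h with ⟨e, t⟩
        simp only [hx] at ht ⊢
        simp only [beq_iff_eq] at ht
        simp [pvSpec, ht, pvSpec2_eq]
      · have hrec := ih (i+1) acc (by omega)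
        simp only [pvALoop, dif_pos h, if_neg ht, hrec, hd]
        rcases hx : tags[i]'h with ⟨e, t⟩
        simp only [hx] at ht ⊢
        simp only [beq_iff_eq] at ht
        simp [pvSpec, ht]
    · have : tags.drop i = [] := List.drop_eq_nil_of_le (by omega)
      simp [pvALoop, h, this, pvSpec]

theorem pvB_eq (l : List (String × String)) : ∀ (locs : List String) (cur : Option String),
    (match (l.foldl pvBStep (locs, cur)).2 with
      | none => (l.foldl pvBStep (locs, cur)).1
      | some s => (l.foldl pvBStep (locs, cur)).1 ++ [s]) =
    locs ++ (match cur with | none => pvSpec l | some s => pvSpec2 s l) := by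
  induction l with
  | nil =>
    intro locs cur
    cases cur <;> simp [pvSpec, pvSpec2]
  | cons x xs ih =>
    intro locs cur
    obtain ⟨e, t⟩ := x
    by_cases h : t == "LOCATION"
    · cases cur with
      | none => simp [pvBStep, h, ih, pvSpec]
      | some s => simp [pvBStep, h, ih, pvSpec2]
    · cases cur with
      | none => simp [pvBStep, h, ih, pvSpec]
      | some s => simp [pvBStep, h, ih, pvSpec2]

-- ===== VERDICT (by name: the statement is the Claim_ definition above) =====
theorem concat_placenames_spec : Claim_equal_concat_placenames := by
  intro tags _
  unfold Spec_concat_placenames concat_placenames concat_placenames_alt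
  rw [pvALoop_eq tags tags.length 0 [] (by omega)]
  have := pvB_eq tags [] none
  simp only [List.nil_append, List.drop_zero] at *
  exact this.symm
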